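/- GENERATED by mk_final_copies.py from the proof of the farm's unit `start_decoder.C13d` (farm:start_decoder.C13d.1: Proof.lean) as the
   re-elaboration sweep compiled it — do not edit. -/
import Vorbis.Spec.Units.start_decoder_C13d
import Vorbis.Spec.Worked.start_decoder_C13d_Lemmas

open X86 X86.User Asan Vorbis Vorbis.Spec Vorbis.Spec.StartDecoder

namespace Vorbis.Spec.start_decoder_C13d

/-- Segment C13d from its three stretches (Lemmas.lean): the body `c13d_body` (0x114fe7 → the inner head 0x114f32 with `k + 1`, or the
overflow stub 0x115027), then `c13d_free` (→ 0x11503c, `setup_temp_free` returned) and `c13d_err` (→ the epilogue 0x113b22). -/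
theorem c13d_seg (Lay : Layout) (hLay : Lay.hi = 0x1000000) (μ : Microarch) (hμ : UserX.MicroOK μ) (u₀ : State)
    (hcode : HasCodeNat Lay u₀ Vorbis.L.start_decoder.entry Vorbis.Code.code_start_decoder.nat Vorbis.L.start_decoder.size)
    (h_load1 : Asan.SmallCheck Lay μ Vorbis.WayInv (Vorbis.CodeOK u₀) [.rax, .rdx] 1 Vorbis.L.__asan_load1_noabort.entry)
    (h_free : ∀ (others : List Obj) (frames : List (Nat × FrameLayout)) (A : Arena) (m : Nat) (rest : List (Nat × Nat)),
      Calls Lay μ Vorbis.WayInv (Vorbis.conv u₀) Vorbis.L.setup_temp_free.entry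
        (Vorbis.Spec.setup_temp_free.spec others frames A m rest))
    (h_error : ∀ (others : List Obj) (frames : List (Nat × FrameLayout)),
      Calls Lay μ Vorbis.WayInv (Vorbis.conv u₀) Vorbis.L.error.entry (Vorbis.Spec.error.spec others frames)) :
    SegC13d Lay μ u₀ := by
  intro g i n d j kk v hat
  -- 0x114fe7 → 0x114f32 ∨ 0x115027
  refine (c13d_body Lay hLay μ hμ u₀ hcode h_load1 g i n d j kk v hat).trans ?_
  intro w hw
  rcases hw with hk | hstub
  · exact ReachVia.done (Or.inl hk)
  · -- 0x115027 → 0x11503c (stb_vorbis_fixed.c:3921)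
    refine (c13d_free Lay hLay μ hμ u₀ hcode h_free g w hstub).trans ?_
    intro w2 hfreed
    -- 0x11503c → 0x113b22 (stb_vorbis_fixed.c:3922)
    refine (c13d_err Lay hLay μ hμ u₀ hcode h_error g w2 hfreed).trans ?_
    intro w3 herr
    exact ReachVia.done (Or.inr herr)

end Vorbis.Spec.start_decoder_C13d

/-- The unit `start_decoder.C13d`: `c13d_seg` under the statement's hypotheses. -/
theorem Vorbis.Spec.Worked.start_decoder_C13d_ok : Vorbis.Spec.start_decoder_C13d.Statement := by
  intro Lay hLay μ hμ u₀ hcode h_load1 h_free h_error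
  exact Vorbis.Spec.start_decoder_C13d.c13d_seg Lay hLay μ hμ u₀ hcode h_load1 h_free h_error
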